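-- pv_equiv track=rewrite | github.com/jaymehta9/Real-Estate-Insight-Chatbot | backend/api/utils.py | extract_areas_from_query
-- ===== SOURCE A (Python) =====
-- def extract_areas_from_query(query, areas):
--     text = query.lower()
--     selected = []
--     for a in areas:
--         name = str(a)
--         if name.lower() in text:
--             selected.append(name)
--     if selected:
--         return list(dict.fromkeys(selected))
--     words = [w for w in text.replace(",", " ").split() if len(w) > 2]
--     for w in words:
--         for a in areas:
--             name = str(a)
--             if w in name.lower():
--                 selected.append(name)
--     if selected:
--         return list(dict.fromkeys(selected))
--     return []
-- ===== SOURCE B (Python) =====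
-- def extract_areas_from_query(query, areas):
--     # Inverted, index-based search: enumerate the query's substrings once into a hash
--     # set (only lengths that occur among the names), so the per-name substring scan of
--     # the text disappears; the fallback pass likewise looks each word up in precomputed
--     # per-name substring indexes instead of scanning every name's text per word.
--     text = query.lower()
--     n = len(text)
--     names = [str(a) for a in areas]
--     lows = [nm.lower() for nm in names]
--     lens = {len(lo) for lo in lows}
--     textsubs = {text[i:i + L] for L in lens for i in range(n - L + 1)}
--     hits = list(dict.fromkeys(nm for nm, lo in zip(names, lows) if lo in textsubs))
--     if hits:
--         return hits
--     words = [w for w in text.replace(",", " ").split() if len(w) > 2]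
--     wlens = {len(w) for w in words}
--     index = [(nm, {lo[i:i + L] for L in wlens for i in range(len(lo) - L + 1)})
--              for nm, lo in zip(names, lows)]
--     return list(dict.fromkeys(nm for w in words for nm, subs in index if w in subs))
-- ===== Notes on version B (the rewrite author's own statement) =====
-- stated objective: faster
-- what changed: B inverts the search direction: it enumerates the query's substrings (of the lengths occurring among the names) into a hash set built once, so each name is matched by a single set lookup instead of a substring scan of the text, and the fallback pass looks each word up in precomputed per-name substring indexes instead of running a substring search over every name per word.
import Mathlib
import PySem

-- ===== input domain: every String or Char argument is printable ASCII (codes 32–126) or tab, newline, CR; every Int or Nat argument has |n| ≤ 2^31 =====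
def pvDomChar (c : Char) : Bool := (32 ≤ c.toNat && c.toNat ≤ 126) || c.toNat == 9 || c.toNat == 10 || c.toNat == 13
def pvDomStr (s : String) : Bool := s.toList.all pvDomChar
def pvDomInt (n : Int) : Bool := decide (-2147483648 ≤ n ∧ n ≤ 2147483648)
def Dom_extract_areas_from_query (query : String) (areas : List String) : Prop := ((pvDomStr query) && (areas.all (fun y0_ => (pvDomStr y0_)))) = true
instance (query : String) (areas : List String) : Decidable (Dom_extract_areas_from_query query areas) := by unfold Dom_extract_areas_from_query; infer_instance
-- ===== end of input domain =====

-- B inverts the search: it enumerates the query's substrings (of the lengths occurring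
-- among the names) into a hash set built once, so each name (and, in the fallback, each
-- word against per-name substring indexes) is matched by one set lookup instead of a
-- substring scan; objective: alternative algorithm, same exact results.

-- ===== PORT A =====
def extract_areas_from_query (query : String) (areas : List String) : List String :=
  let text := PySem.Chars.lower query.toList
  let selected := areas.foldl (fun acc a =>
    if PySem.Chars.isIn (PySem.Chars.lower a.toList) text then acc ++ [a] else acc) []
  if selected ≠ [] then PySem.List.dedup selected
  else
    let words := (PySem.Chars.split₀ (PySem.Chars.replace text [','] [' '])).filter
      (fun w => decide (2 < w.length))
    let selected2 := words.foldl (fun acc w =>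
      areas.foldl (fun acc2 a =>
        if PySem.Chars.isIn w (PySem.Chars.lower a.toList) then acc2 ++ [a] else acc2) acc) selected
    if selected2 ≠ [] then PySem.List.dedup selected2 else []

-- ===== PORT B =====
-- the substring index {t[i:i+L] for L in lens for i in range(len(t)-L+1)}
def pvSubIndex (t : List Char) (lens : List Nat) : PySem.Set (List Char) :=
  PySem.Set.ofList (lens.flatMap (fun (L : Nat) =>
    (PySem.List.pyRange 0 ((t.length : Int) - (L : Int) + 1) 1).map
      (fun i => PySem.List.slice t (some i) (some (i + (L : Int))))))

def extract_areas_from_query_alt (query : String) (areas : List String) : List String :=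
  let text := PySem.Chars.lower query.toList
  let lows := areas.map (fun nm => PySem.Chars.lower nm.toList)
  let lens : PySem.Set Nat := PySem.Set.ofList (lows.map List.length)
  let textsubs := pvSubIndex text lens
  let hits := PySem.List.dedup
    (((areas.zip lows).filter (fun p => PySem.Set.contains textsubs p.2)).map Prod.fst)
  if hits ≠ [] then hits
  else
    let words := (PySem.Chars.split₀ (PySem.Chars.replace text [','] [' '])).filter
      (fun w => decide (2 < w.length))
    let wlens : PySem.Set Nat := PySem.Set.ofList (words.map List.length)
    let index := (areas.zip lows).map (fun p => (p.1, pvSubIndex p.2 wlens))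
    PySem.List.dedup (words.flatMap (fun w =>
      ((index.filter (fun q => PySem.Set.contains q.2 w)).map Prod.fst)))

-- ===== PRECONDITION & SPEC =====
def Spec_extract_areas_from_query (query : String) (areas : List String) (out : List String) : Prop := out = extract_areas_from_query_alt query areas
instance (query : String) (areas : List String) (out : List String) : Decidable (Spec_extract_areas_from_query query areas out) := by unfold Spec_extract_areas_from_query; infer_instance

-- ===== CLAIM (what is proved, stated in full; the proofs are below) =====
def Claim_equal_extract_areas_from_query : Prop := ∀ (query : String) (areas : List String), Dom_extract_areas_from_query query areas → Spec_extract_areas_from_query query areas (extract_areas_from_query query areas)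

-- ===== LEMMAS AND PROOFS =====

-- membership in the substring index IS Python's substring test, provided the
-- queried pattern's length is one of the indexed lengths
theorem pv_contains_ofList {α : Type} [BEq α] [LawfulBEq α] (l : List α) (x : α) :
    PySem.Set.contains (PySem.Set.ofList l) x = true ↔ x ∈ l := by
  rw [show (PySem.Set.contains (PySem.Set.ofList l) x = true) ↔ x ∈ PySem.Set.ofList l from
    by simp [PySem.Set.contains]]
  exact PySem.Set.mem_ofList _ _

theorem pv_contains_subIndex (t : List Char) (lens : List Nat) (p : List Char)
    (hp : p.length ∈ lens) :
    PySem.Set.contains (pvSubIndex t lens) p = PySem.Chars.isIn p t := by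
  rw [Bool.eq_iff_iff]
  rw [← PySem.Chars.exists_prefix_drop_iff_isIn]
  unfold pvSubIndex
  rw [pv_contains_ofList]
  simp only [List.mem_flatMap, List.mem_map, PySem.List.mem_pyRange_one]
  constructor
  · rintro ⟨L, _, i, ⟨hi0, _⟩, hslice⟩
    obtain ⟨j, rfl⟩ : ∃ j : Nat, i = (j : Int) := ⟨i.toNat, (Int.toNat_of_nonneg hi0).symm⟩
    refine ⟨j, ?_⟩
    rw [PySem.List.slice_natCast_add] at hslice
    rw [← hslice]
    exact List.take_prefix _ _
  · rintro ⟨j, hpre⟩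
    by_cases hj : j ≤ t.length
    · have hlen : p.length ≤ t.length - j := by
        simpa using hpre.length_le
      refine ⟨p.length, hp, (j : Int), ⟨by positivity, ?_⟩, ?_⟩
      · have : j + p.length ≤ t.length := by omega
        omega
      · rw [PySem.List.slice_natCast_add]
        exact ((List.prefix_iff_eq_take.mp hpre).symm)
    · have hnil : t.drop j = [] := List.drop_eq_nil_of_le (by omega)
      rw [hnil] at hpre
      have hp0 : p = [] := List.prefix_nil.mp hpre
      refine ⟨p.length, hp, 0, ⟨le_refl _, ?_⟩, ?_⟩
      · have : p.length = 0 := by simp [hp0]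
        rw [this]
        omega
      · rw [show (0 : Int) = ((0 : Nat) : Int) from rfl, PySem.List.slice_natCast_add]
        simp [hp0]

-- zip of a list with its own map is a map of pairs
theorem pv_zip_map {α β : Type} (l : List α) (f : α → β) :
    l.zip (l.map f) = l.map (fun a => (a, f a)) := by
  induction l with
  | nil => rfl
  | cons x l ih => simp [ih]

-- project-first of a filter-on-second over such pairs is a plain filter
theorem pv_map_fst_filter_snd {α β : Type} (l : List α) (f : α → β) (c : β → Bool) :
    (((l.map (fun a => (a, f a))).filter (fun p => c p.2)).map Prod.fst)
    = l.filter (fun a => c (f a)) := by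
  induction l with
  | nil => rfl
  | cons x l ih =>
    by_cases h : c (f x) = true
    · simp [h, ih]
    · simp [h, ih]

-- flatMap only depends on the function's values on members
theorem pv_flatMap_congr {α β : Type} (l : List α) (f g : α → List β)
    (h : ∀ x ∈ l, f x = g x) : l.flatMap f = l.flatMap g := by
  induction l with
  | nil => rfl
  | cons x l ih =>
    simp only [List.flatMap_cons, h x (by simp)]
    rw [ih (fun y hy => h y (by simp [hy]))]

-- dedup of nothing is nothing, and dedup is nonempty iff the list is
theorem pv_dedup_eq_nil_iff (l : List String) : PySem.List.dedup l = [] ↔ l = [] := by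
  constructor
  · intro h
    cases l with
    | nil => rfl
    | cons x l =>
      exfalso
      have : x ∈ PySem.List.dedup (x :: l) := (PySem.List.mem_dedup _ _).mpr (by simp)
      rw [h] at this
      simp at this
  · intro h; subst h; rfl

-- A's trailing "if nonempty then dedup else []" is just dedup
theorem pv_dedup_if (l : List String) :
    (if l ≠ [] then PySem.List.dedup l else []) = PySem.List.dedup l := by
  by_cases h : l = []
  · subst h; simp
  · rw [if_pos h]

-- ===== VERDICT (by name: the statement is the Claim_ definition above) =====
theorem extract_areas_from_query_spec : Claim_equal_extract_areas_from_query := by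
  intro query areas _
  unfold Spec_extract_areas_from_query
  dsimp only [extract_areas_from_query, extract_areas_from_query_alt]
  generalize PySem.Chars.lower query.toList = text
  -- A's first pass is a filter
  have hsel : areas.foldl (fun acc a =>
      if PySem.Chars.isIn (PySem.Chars.lower a.toList) text then acc ++ [a] else acc) []
      = areas.filter (fun a => PySem.Chars.isIn (PySem.Chars.lower a.toList) text) := by
    simpa using PySem.List.foldl_append_if
      (fun a => PySem.Chars.isIn (PySem.Chars.lower a.toList) text) id areas []
  -- B's first pass is the dedup of the same filter (index lookup = substring test)
  have hzip := pv_zip_map areas (fun nm => PySem.Chars.lower nm.toList)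
  have hhits : (((areas.map (fun nm => (nm, PySem.Chars.lower nm.toList))).filter
        (fun p => PySem.Set.contains (pvSubIndex text
          (PySem.Set.ofList ((areas.map (fun nm => PySem.Chars.lower nm.toList)).map List.length))) p.2)).map Prod.fst
      = areas.filter (fun a => PySem.Chars.isIn (PySem.Chars.lower a.toList) text)) := by
    rw [pv_map_fst_filter_snd]
    apply List.filter_congr
    intro a ha
    apply pv_contains_subIndex
    exact (PySem.Set.mem_ofList _ _).mpr
      (List.mem_map.mpr ⟨PySem.Chars.lower a.toList, List.mem_map.mpr ⟨a, ha, rfl⟩, rfl⟩)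
  simp only [hsel, hzip, hhits]
  set sel := areas.filter (fun a => PySem.Chars.isIn (PySem.Chars.lower a.toList) text) with hseldef
  by_cases hne : sel = []
  · -- phase 1 empty on both sides
    have hd : PySem.List.dedup sel = [] := (pv_dedup_eq_nil_iff sel).mpr hne
    rw [if_neg (fun h => h hne), hd, if_neg (fun h : ([] : List String) ≠ [] => h rfl), hne]
    set words := (PySem.Chars.split₀ (PySem.Chars.replace text [','] [' '])).filter
      (fun w => decide (2 < w.length)) with hwordsdef
    -- A's nested pass is a flatMap of filters
    have hinner : ∀ (acc : List String) (w : List Char),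
        areas.foldl (fun acc2 a =>
          if PySem.Chars.isIn w (PySem.Chars.lower a.toList) then acc2 ++ [a] else acc2) acc
        = acc ++ areas.filter (fun a => PySem.Chars.isIn w (PySem.Chars.lower a.toList)) := by
      intro acc w
      simpa using PySem.List.foldl_append_if
        (fun a => PySem.Chars.isIn w (PySem.Chars.lower a.toList)) id areas acc
    simp only [hinner]
    simp only [PySem.List.foldl_append_eq_flatMap, List.nil_append]
    rw [pv_dedup_if]
    -- B's word pass: each lookup in a name's index is the substring test
    have hbw : words.flatMap (fun w =>
        (((areas.map (fun a => (a, PySem.Chars.lower a.toList))).map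
            (fun p => (p.1, pvSubIndex p.2 (PySem.Set.ofList (words.map List.length))))).filter
          (fun q => PySem.Set.contains q.2 w)).map Prod.fst)
      = words.flatMap (fun w => areas.filter (fun a => PySem.Chars.isIn w (PySem.Chars.lower a.toList))) := by
      apply pv_flatMap_congr
      intro w hw
      rw [List.map_map]
      have : ((areas.map (fun a => (a, pvSubIndex (PySem.Chars.lower a.toList)
            (PySem.Set.ofList (words.map List.length))))).filter
          (fun q => PySem.Set.contains q.2 w)).map Prod.fst
          = areas.filter (fun a => PySem.Set.contains
              (pvSubIndex (PySem.Chars.lower a.toList) (PySem.Set.ofList (words.map List.length))) w) := by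
        exact pv_map_fst_filter_snd areas _ (fun S => PySem.Set.contains S w)
      rw [show ((fun p : String × List Char => (p.1, pvSubIndex p.2 (PySem.Set.ofList (words.map List.length)))) ∘
          (fun a => (a, PySem.Chars.lower a.toList)))
          = fun a => (a, pvSubIndex (PySem.Chars.lower a.toList) (PySem.Set.ofList (words.map List.length))) from rfl]
      rw [this]
      apply List.filter_congr
      intro a _
      apply pv_contains_subIndex
      exact (PySem.Set.mem_ofList _ _).mpr (List.mem_map.mpr ⟨w, hw, rfl⟩)
    rw [hbw]
  · -- phase 1 nonempty: both return dedup sel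
    have hd : PySem.List.dedup sel ≠ [] := fun h => hne ((pv_dedup_eq_nil_iff sel).mp h)
    rw [if_pos hne, if_pos hd]
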